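-- pv_equiv track=rewrite | github.com/DecimalTurn/VBA-GitHub-Checks | .github/workflows/gh.py | get_check
-- ===== SOURCE A (Python) =====
-- def get_check(issue):
--     labels = issue['labels']
--     for label in labels:
--         if label['name'].startswith('Check'):
--             check_prefix = 'Check '
--             for label in labels:
--                 if label['name'].startswith(check_prefix):
--                     return label['name'][len(check_prefix):]
--     return None
-- ===== SOURCE B (Python) =====
-- def get_check(issue):
--     # Declarative first-match: lazily map each label to its 'Check '-suffix and
--     # take the first hit; A's redundant outer 'Check' scan disappears.
--     return next(
--         (label['name'][6:] for label in issue['labels']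
--          if label['name'].startswith('Check ')),
--         None)
-- ===== Notes on version B (the rewrite author's own statement) =====
-- stated objective: idiomatic
-- what changed: B replaces A's two nested explicit scans (an outer scan for a 'Check' prefix that restarts an inner scan for 'Check ') with a single declarative next() over a generator yielding the suffixes of 'Check '-labels, which is equivalent because every 'Check ' match is also a 'Check' match.
import Mathlib
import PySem

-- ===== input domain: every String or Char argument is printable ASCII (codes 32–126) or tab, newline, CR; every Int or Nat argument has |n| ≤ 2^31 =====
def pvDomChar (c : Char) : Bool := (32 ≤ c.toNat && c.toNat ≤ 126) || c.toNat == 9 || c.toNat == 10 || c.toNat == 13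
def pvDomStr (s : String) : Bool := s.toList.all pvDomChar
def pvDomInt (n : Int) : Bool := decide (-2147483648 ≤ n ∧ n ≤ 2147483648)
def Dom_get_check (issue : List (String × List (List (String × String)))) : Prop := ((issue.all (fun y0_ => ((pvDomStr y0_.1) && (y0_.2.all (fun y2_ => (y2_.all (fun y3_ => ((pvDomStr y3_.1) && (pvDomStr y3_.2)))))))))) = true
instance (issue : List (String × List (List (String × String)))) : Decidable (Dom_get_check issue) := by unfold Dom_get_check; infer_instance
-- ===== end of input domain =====

-- B replaces A's nested explicit scans by one declarative next() over a
-- generator of 'Check '-suffixes; equivalence of return values proved below.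

-- ===== PORT A =====
-- inner loop of A: scan labels for the first name starting with 'Check ' and return its suffix
def pvInnerA : List (List (String × String)) → Option String
  | [] => none
  | l :: rest =>
    match List.lookup "name" l with
    | none => none  -- KeyError in Python; excluded by Pre_get_check
    | some n =>
      if PySem.Str.startswith n "Check " then some (PySem.Str.slice n (some 6) none)
      else pvInnerA rest

-- outer loop of A: scan for a name starting with 'Check', then run the inner scan over ALL labels
def pvOuterA : List (List (String × String)) → List (List (String × String)) → Option String
  | [], _ => none
  | l :: rest, all =>
    match List.lookup "name" l with
    | none => none  -- KeyError in Python; excluded by Pre_get_check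
    | some n =>
      if PySem.Str.startswith n "Check" then pvInnerA all
      else pvOuterA rest all

def get_check (issue : List (String × List (List (String × String)))) : Option String :=
  match List.lookup "labels" issue with
  | none => none  -- KeyError in Python; excluded by Pre_get_check
  | some labels => pvOuterA labels labels

-- ===== PORT B =====
-- one generator element: the 'Check '-suffix of this label's name, if any
-- (a label without 'name' is a KeyError in Python; excluded by Pre_get_check)
def pvCheckSuffix? (l : List (String × String)) : Option String :=
  (List.lookup "name" l).bind (fun n =>
    if PySem.Str.startswith n "Check " then some (PySem.Str.slice n (some 6) none) else none)

-- next(gen, None): the first element the lazy generator yields, else none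
def get_check_alt (issue : List (String × List (List (String × String)))) : Option String :=
  match List.lookup "labels" issue with
  | none => none
  | some labels => labels.findSome? pvCheckSuffix?

-- ===== PRECONDITION & SPEC =====
-- does this label dict carry a name starting with 'Check '?
def pvHasCheck (l : List (String × String)) : Bool :=
  match List.lookup "name" l with
  | some n => PySem.Str.startswith n "Check "
  | none => false

-- Pre_ excludes exactly the inputs on which A raises KeyError: issues without a
-- 'labels' key, or with a label dict lacking 'name' that is not preceded by a
-- 'Check '-label (both programs return the suffix before reaching it otherwise).
def Pre_get_check (issue : List (String × List (List (String × String)))) : Prop :=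
  (List.lookup "labels" issue).isSome = true ∧
  ∀ k < ((List.lookup "labels" issue).getD []).length,
    (List.lookup "name" (((List.lookup "labels" issue).getD []).getD k [])).isSome = true ∨
    ∃ j < k, pvHasCheck (((List.lookup "labels" issue).getD []).getD j []) = true
instance (issue : List (String × List (List (String × String)))) : Decidable (Pre_get_check issue) := by unfold Pre_get_check; infer_instance

def pvWitness_get_check : (List (String × List (List (String × String)))) :=
  [("labels", [[("name", "Check x")], [("name", "bug")]])]

def Spec_get_check (issue : List (String × List (List (String × String)))) (out : Option String) : Prop := out = get_check_alt issue
instance (issue : List (String × List (List (String × String)))) (out : Option String) : Decidable (Spec_get_check issue out) := by unfold Spec_get_check; infer_instance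

-- ===== CLAIM (what is proved, stated in full; the proofs are below) =====
def Claim_equal_get_check : Prop := ∀ (issue : List (String × List (List (String × String)))), Dom_get_check issue → Pre_get_check issue → Spec_get_check issue (get_check issue)

-- ===== LEMMAS AND PROOFS =====

-- any name starting with 'Check ' also starts with 'Check'
lemma startswith_check_of_check_space (n : String)
    (h : PySem.Str.startswith n "Check " = true) :
    PySem.Str.startswith n "Check" = true := by
  simp only [PySem.Str.startswith_eq] at h ⊢
  rw [PySem.Chars.startswith_iff] at h ⊢
  exact List.IsPrefix.trans (by decide) h

-- the scan is safe: every name is present up to and including the first 'Check '-match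
def SafeScan : List (List (String × String)) → Prop
  | [] => True
  | l :: rest => (List.lookup "name" l).isSome = true ∧ (pvHasCheck l = true ∨ SafeScan rest)

-- the quantified precondition implies scan safety
lemma safeScan_of_pre (ls : List (List (String × String)))
    (h : ∀ k < ls.length, (List.lookup "name" (ls.getD k [])).isSome = true ∨
         ∃ j < k, pvHasCheck (ls.getD j []) = true) : SafeScan ls := by
  induction ls with
  | nil => trivial
  | cons l rest ih =>
    have h0 : (List.lookup "name" l).isSome = true := by
      rcases h 0 (by simp) with h0 | ⟨j, hj, _⟩
      · simpa using h0
      · omega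
    refine ⟨h0, ?_⟩
    by_cases hc : pvHasCheck l = true
    · exact Or.inl hc
    · refine Or.inr (ih ?_)
      intro k hk
      rcases h (k + 1) (by simpa using Nat.succ_lt_succ hk) with h1 | ⟨j, hj, hjc⟩
      · exact Or.inl (by simpa using h1)
      · cases j with
        | zero => exact absurd (by simpa using hjc) hc
        | succ j' => exact Or.inr ⟨j', by omega, by simpa using hjc⟩

-- on a safe list, A's inner scan and B's first-match generator agree
lemma innerA_eq_findSome (ls : List (List (String × String))) (h : SafeScan ls) :
    pvInnerA ls = ls.findSome? pvCheckSuffix? := by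
  induction ls with
  | nil => rfl
  | cons l rest ih =>
    obtain ⟨hname, hrest0⟩ := h
    obtain ⟨n, hn⟩ := Option.isSome_iff_exists.mp hname
    by_cases hc : PySem.Str.startswith n "Check " = true
    · have hc' : PySem.Chars.startswith n.toList ['C','h','e','c','k',' '] = true := by
        simpa using hc
      simp [pvInnerA, List.findSome?, pvCheckSuffix?, hn, hc']
    · have hrest : SafeScan rest := by
        rcases hrest0 with hchk | hs
        · exact absurd (by simpa [pvHasCheck, hn] using hchk) hc
        · exact hs
      have hc' : PySem.Chars.startswith n.toList ['C','h','e','c','k',' '] = false := by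
        simpa using hc
      simp [pvInnerA, List.findSome?_cons, pvCheckSuffix?, hn, hc', ih hrest]

-- A's outer loop either triggers the inner scan of the whole list, or finds nothing,
-- in which case B's scan of the same prefix finds nothing either
lemma outerA_cases (ls all : List (List (String × String)))
    (h : SafeScan ls) :
    pvOuterA ls all = pvInnerA all ∨
    (pvOuterA ls all = none ∧ ls.findSome? pvCheckSuffix? = none) := by
  induction ls with
  | nil => exact Or.inr ⟨rfl, rfl⟩
  | cons l rest ih =>
    obtain ⟨hname, hrest0⟩ := h
    obtain ⟨n, hn⟩ := Option.isSome_iff_exists.mp hname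
    by_cases hc : PySem.Str.startswith n "Check" = true
    · have hc2 : PySem.Chars.startswith n.toList ['C','h','e','c','k'] = true := by
        simpa using hc
      left; simp [pvOuterA, hn, hc2]
    · have hcs : PySem.Str.startswith n "Check " ≠ true := by
        intro hsp; exact hc (startswith_check_of_check_space n hsp)
      have hrest := ih (by
        rcases hrest0 with hchk | hs
        · exact absurd (by simpa [pvHasCheck, hn] using hchk) hcs
        · exact hs)
      have hc2 : PySem.Chars.startswith n.toList ['C','h','e','c','k'] = false := by
        simpa using hc
      have hcs2 : PySem.Chars.startswith n.toList ['C','h','e','c','k',' '] = false := by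
        simpa using hcs
      rcases hrest with h1 | ⟨h1, h2⟩
      · left; simpa [pvOuterA, hn, hc2] using h1
      · right
        constructor
        · simpa [pvOuterA, hn, hc2] using h1
        · have hcs3 : PySem.Str.startswith n "Check " = false := by simpa using hcs2
          simp only [List.findSome?_cons, pvCheckSuffix?, hn, Option.bind_some, hcs3,
            Bool.false_eq_true, if_false]
          exact h2

-- ===== VERDICT (by name: the statement is the Claim_ definition above) =====
theorem get_check_spec : Claim_equal_get_check := by
  intro issue _ hpre
  obtain ⟨hsome, hnames⟩ := hpre
  obtain ⟨ls, hls⟩ := Option.isSome_iff_exists.mp hsome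
  rw [hls] at hnames
  simp only [Option.getD_some] at hnames
  unfold Spec_get_check get_check get_check_alt
  rw [hls]
  show pvOuterA ls ls = ls.findSome? pvCheckSuffix?
  have hs := safeScan_of_pre ls hnames
  rcases outerA_cases ls ls hs with h | ⟨h1, h2⟩
  · rw [h, innerA_eq_findSome ls hs]
  · rw [h1, h2]
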